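-- pv_equiv track=rewrite | github.com/mdrasmus/argweaver | argweaver/deps/compbio/arglib.py | is_split_compatible_unpolar2
-- ===== SOURCE A (Python) =====
-- def is_split_compatible_unpolar2(split1, split2, leaves):
--
--     a = set(split1)
--     b = set(split2)
--     x00 = False
--     x01 = False
--     x10 = False
--     x11 = False
--     for l in leaves:
--         if l in a:
--             if l in b:
--                 x11 = True
--             else:
--                 x10 = True
--         else:
--             if l in b:
--                 x01 = True
--             else:
--                 x00 = True
--
--     return not (x00 and x01 and x10 and x11)
-- ===== SOURCE B (Python) =====
-- def is_split_compatible_unpolar2(split1, split2, leaves):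
--     L = set(leaves)
--     a = set(split1)
--     b = set(split2)
--     x11 = bool(L & a & b)
--     x10 = bool((L & a) - b)
--     x01 = bool((L & b) - a)
--     x00 = bool((L - a) - b)
--     return not (x00 and x01 and x10 and x11)
-- ===== Notes on version B (the rewrite author's own statement) =====
-- stated objective: idiomatic
-- what changed: Replaces the per-leaf nested-branch loop that sets four flags with direct set-algebra occupancy tests: each of the four quadrant flags is computed as one set intersection/difference expression.
import Mathlib
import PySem

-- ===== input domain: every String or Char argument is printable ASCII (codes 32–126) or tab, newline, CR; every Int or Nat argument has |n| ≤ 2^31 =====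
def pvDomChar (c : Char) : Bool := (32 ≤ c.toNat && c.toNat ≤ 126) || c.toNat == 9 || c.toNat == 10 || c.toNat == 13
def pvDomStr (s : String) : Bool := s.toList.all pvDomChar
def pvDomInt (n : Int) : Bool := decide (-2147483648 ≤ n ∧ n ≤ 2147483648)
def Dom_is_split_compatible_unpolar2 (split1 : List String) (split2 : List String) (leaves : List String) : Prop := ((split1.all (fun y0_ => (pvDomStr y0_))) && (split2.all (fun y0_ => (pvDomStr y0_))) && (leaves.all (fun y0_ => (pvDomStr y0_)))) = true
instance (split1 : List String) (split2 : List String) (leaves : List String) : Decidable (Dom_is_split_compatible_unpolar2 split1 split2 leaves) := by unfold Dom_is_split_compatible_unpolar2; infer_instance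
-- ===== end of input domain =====

-- ===== PORT A =====
-- Loop over leaves, setting one of four occupancy flags per leaf via nested branches.
def is_split_compatible_unpolar2 (split1 : List String) (split2 : List String) (leaves : List String) : Bool :=
  let a := PySem.Set.ofList split1
  let b := PySem.Set.ofList split2
  let st := leaves.foldl (fun (st : Bool × Bool × Bool × Bool) l =>
    let (x00, x01, x10, x11) := st
    if PySem.Set.contains a l then
      if PySem.Set.contains b l then (x00, x01, x10, true)
      else (x00, x01, true, x11)
    else
      if PySem.Set.contains b l then (x00, true, x10, x11)
      else (true, x01, x10, x11)) (false, false, false, false)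
  !(st.1 && st.2.1 && st.2.2.1 && st.2.2.2)

-- ===== PORT B =====
-- B (one honest line): same answer via set algebra — each quadrant flag is a single
-- intersection/difference non-emptiness test instead of a branching loop.
def is_split_compatible_unpolar2_alt (split1 : List String) (split2 : List String) (leaves : List String) : Bool :=
  let L := PySem.Set.ofList leaves
  let a := PySem.Set.ofList split1
  let b := PySem.Set.ofList split2
  let x11 := !(PySem.Set.inter (PySem.Set.inter L a) b).isEmpty
  let x10 := !(PySem.Set.diff (PySem.Set.inter L a) b).isEmpty
  let x01 := !(PySem.Set.diff (PySem.Set.inter L b) a).isEmpty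
  let x00 := !(PySem.Set.diff (PySem.Set.diff L a) b).isEmpty
  !(x00 && x01 && x10 && x11)

-- ===== PRECONDITION & SPEC =====
def Spec_is_split_compatible_unpolar2 (split1 : List String) (split2 : List String) (leaves : List String) (out : Bool) : Prop := out = is_split_compatible_unpolar2_alt split1 split2 leaves
instance (split1 : List String) (split2 : List String) (leaves : List String) (out : Bool) : Decidable (Spec_is_split_compatible_unpolar2 split1 split2 leaves out) := by unfold Spec_is_split_compatible_unpolar2; infer_instance

-- ===== CLAIM (what is proved, stated in full; the proofs are below) =====
def Claim_equal_is_split_compatible_unpolar2 : Prop := ∀ (split1 : List String) (split2 : List String) (leaves : List String), Dom_is_split_compatible_unpolar2 split1 split2 leaves → Spec_is_split_compatible_unpolar2 split1 split2 leaves (is_split_compatible_unpolar2 split1 split2 leaves)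

-- ===== LEMMAS AND PROOFS =====

-- A's fold computed: each flag is its initial value OR'ed with an existence test over leaves.
theorem foldl_flags (a b : PySem.Set String) (leaves : List String)
    (x00 x01 x10 x11 : Bool) :
    leaves.foldl (fun (st : Bool × Bool × Bool × Bool) l =>
      let (x00, x01, x10, x11) := st
      if PySem.Set.contains a l then
        if PySem.Set.contains b l then (x00, x01, x10, true)
        else (x00, x01, true, x11)
      else
        if PySem.Set.contains b l then (x00, true, x10, x11)
        else (true, x01, x10, x11)) (x00, x01, x10, x11)
    = (x00 || leaves.any (fun l => !PySem.Set.contains a l && !PySem.Set.contains b l),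
       x01 || leaves.any (fun l => !PySem.Set.contains a l && PySem.Set.contains b l),
       x10 || leaves.any (fun l => PySem.Set.contains a l && !PySem.Set.contains b l),
       x11 || leaves.any (fun l => PySem.Set.contains a l && PySem.Set.contains b l)) := by
  induction leaves generalizing x00 x01 x10 x11 with
  | nil => simp
  | cons l ls ih =>
    rw [List.foldl_cons]
    cases ha : PySem.Set.contains a l <;> cases hb : PySem.Set.contains b l <;>
      simp only [Bool.false_eq_true, if_true, if_false, ih,
        List.any_cons, ha, hb, Bool.not_true, Bool.not_false, Bool.and_true, Bool.and_false, Bool.false_or, Bool.or_true, Bool.true_or]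

-- Non-emptiness of a set whose membership is "in leaves and p" equals List.any p over leaves.
theorem any_eq_not_isEmpty (leaves : List String) (s : List String) (p : String → Bool)
    (h : ∀ x, x ∈ s ↔ x ∈ leaves ∧ p x = true) :
    leaves.any p = !s.isEmpty := by
  rw [Bool.eq_iff_iff, List.any_eq_true]
  cases s with
  | nil =>
    simp only [List.isEmpty_nil]
    constructor
    · rintro ⟨l, hl, hp⟩
      exact absurd ((h l).2 ⟨hl, hp⟩) (List.not_mem_nil)
    · simp
  | cons y ys =>
    simp only [List.isEmpty_cons, Bool.not_false, iff_true]
    have hy := (h y).1 List.mem_cons_self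
    exact ⟨y, hy.1, hy.2⟩

theorem is_split_compatible_unpolar2_spec' :
    ∀ (split1 split2 leaves : List String),
      is_split_compatible_unpolar2 split1 split2 leaves
        = is_split_compatible_unpolar2_alt split1 split2 leaves := by
  intro split1 split2 leaves
  unfold is_split_compatible_unpolar2 is_split_compatible_unpolar2_alt
  simp only [foldl_flags, Bool.false_or]
  rw [any_eq_not_isEmpty leaves (PySem.Set.diff (PySem.Set.diff (PySem.Set.ofList leaves) (PySem.Set.ofList split1)) (PySem.Set.ofList split2))
        _ (fun x => by
          simp [PySem.Set.mem_diff, PySem.Set.mem_ofList]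
          tauto),
      any_eq_not_isEmpty leaves (PySem.Set.diff (PySem.Set.inter (PySem.Set.ofList leaves) (PySem.Set.ofList split2)) (PySem.Set.ofList split1))
        _ (fun x => by
          simp [PySem.Set.mem_diff, PySem.Set.mem_inter, PySem.Set.mem_ofList]
          tauto),
      any_eq_not_isEmpty leaves (PySem.Set.diff (PySem.Set.inter (PySem.Set.ofList leaves) (PySem.Set.ofList split1)) (PySem.Set.ofList split2))
        _ (fun x => by
          simp [PySem.Set.mem_diff, PySem.Set.mem_inter, PySem.Set.mem_ofList]
          tauto),
      any_eq_not_isEmpty leaves (PySem.Set.inter (PySem.Set.inter (PySem.Set.ofList leaves) (PySem.Set.ofList split1)) (PySem.Set.ofList split2))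
        _ (fun x => by
          simp [PySem.Set.mem_inter, PySem.Set.mem_ofList]
          tauto)]

-- ===== VERDICT (by name: the statement is the Claim_ definition above) =====
theorem is_split_compatible_unpolar2_spec : Claim_equal_is_split_compatible_unpolar2 := by
  intro split1 split2 leaves _
  exact is_split_compatible_unpolar2_spec' split1 split2 leaves
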